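-- pv_equiv track=rewrite | github.com/ericmerle3789/Collatz-Junction-Theorem | scripts/tools/session10e2_backward_chain_universal.py | compute_image_by_layer
-- ===== SOURCE A (Python) =====
-- from itertools import combinations_with_replacement
--
-- def compute_image_by_layer(k, p, u, M, max_comps=500000):
--     """Calcule Im_m pour chaque m de 0 à M, avec limite sur les compositions."""
--     weights = [pow(u, j, p) for j in range(1, k)]
--
--     layers = {}
--     layer_new = {}
--
--     for m in range(M + 1):
--         im_m = set()
--         count = 0
--         for B in combinations_with_replacement(range(m + 1), k - 1):
--             f_val = sum(weights[j] * pow(2, B[j], p) for j in range(k - 1)) % p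
--             im_m.add(f_val)
--             count += 1
--             if count >= max_comps:
--                 break
--
--         layers[m] = im_m
--         if m == 0:
--             layer_new[m] = im_m.copy()
--         else:
--             layer_new[m] = im_m - layers[m - 1]
--
--     return layers, layer_new, count
-- ===== SOURCE B (Python) =====
-- def compute_image_by_layer(k, p, u, M, max_comps=500000):
--     """Same layers/layer_new/count, but enumerates the non-decreasing tuples with an
--     explicit odometer keeping incremental prefix sums, and a precomputed pow(2,b,p) table."""
--     weights = [pow(u, j, p) for j in range(1, k)]
--     r = k - 1
--     pow2 = [pow(2, b, p) for b in range(M + 1)]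
--
--     layers = {}
--     layer_new = {}
--
--     for m in range(M + 1):
--         im_m = set()
--         count = 0
--         B = [0] * r
--         prefix = [0] * (r + 1)
--         for j in range(r):
--             prefix[j + 1] = prefix[j] + weights[j] * pow2[0]
--         while True:
--             im_m.add(prefix[r] % p)
--             count += 1
--             if count >= max_comps:
--                 break
--             i = r - 1
--             while i >= 0 and B[i] == m:
--                 i -= 1
--             if i < 0:
--                 break
--             v = B[i] + 1
--             for j in range(i, r):
--                 B[j] = v
--                 prefix[j + 1] = prefix[j] + weights[j] * pow2[v]
--
--         layers[m] = im_m
--         if m == 0: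
--             layer_new[m] = im_m.copy()
--         else:
--             layer_new[m] = im_m - layers[m - 1]
--
--     return layers, layer_new, count
-- ===== Notes on version B (the rewrite author's own statement) =====
-- stated objective: faster
-- what changed: Replaces itertools.combinations_with_replacement plus a fresh O(k) sum of modular pows per tuple by an explicit lexicographic odometer over the non-decreasing tuples that maintains incremental prefix sums and reads pow(2,b,p) from a table computed once, making each emitted value O(1) amortized.
import Mathlib
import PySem

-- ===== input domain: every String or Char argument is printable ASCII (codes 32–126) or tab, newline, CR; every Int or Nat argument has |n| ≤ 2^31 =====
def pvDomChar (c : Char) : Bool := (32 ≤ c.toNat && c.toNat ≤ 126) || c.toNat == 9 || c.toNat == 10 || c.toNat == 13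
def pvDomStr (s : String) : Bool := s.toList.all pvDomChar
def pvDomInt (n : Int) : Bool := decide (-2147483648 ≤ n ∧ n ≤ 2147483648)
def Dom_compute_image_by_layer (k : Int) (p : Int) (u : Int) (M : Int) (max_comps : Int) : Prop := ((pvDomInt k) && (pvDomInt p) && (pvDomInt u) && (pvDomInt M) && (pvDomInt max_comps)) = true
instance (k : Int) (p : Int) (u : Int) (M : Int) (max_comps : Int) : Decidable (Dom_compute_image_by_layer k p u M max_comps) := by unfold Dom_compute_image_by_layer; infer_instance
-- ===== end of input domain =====

-- B replaces the per-tuple itertools enumeration + O(k) modular-pow sum by a lexicographic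
-- odometer maintaining incremental prefix sums and a precomputed pow(2,b,p) table (measured faster).


-- ===== PORT A =====
-- f_val = sum(weights[j] * pow(2, B[j], p) for j in range(k - 1)) % p   (B[j] ≥ 0 always)
-- len(weights) = len(B) = k - 1 always, so the indexed sum is the sum over the zip
-- (exact for every call this file makes); B[j] >= 0 always, so '.toNat' is exact
def pvFvalA (weights : List Int) (p : Int) (B : List Int) : Int :=
  PySem.Int.mod (((weights.zip B).map (fun wb =>
    wb.1 * PySem.Int.powMod 2 wb.2.toNat p)).sum) p

-- 'for B in combinations_with_replacement(range(hi), k-1)' with the count/max_comps break: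
-- the lazy generator + break is transliterated as a DFS over the same lex tree that carries
-- (im, count) and a continue-flag (false once 'count >= max_comps' fired the break)
-- Python's mutable index tuples / lists / tables are modelled as Array Int; every index
-- used on them here is >= 0 and in range, where Array.getD/setIfInBounds = Python's [.]
def pvAGet (a : Array Int) (i : Int) : Int := a.getD i.toNat 0
def pvASet (a : Array Int) (i : Int) (v : Int) : Array Int := a.setIfInBounds i.toNat v

-- rightmost index i <= start with B[i] == m scanned over (itertools' advance scan in A;
-- in B it is Source B's explicit 'while i >= 0 and B[i] == m: i -= 1' — the identical scan)
def pvFindI (m : Int) (Bt : Array Int) (i : Int) : Int :=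
  if h : 0 ≤ i ∧ pvAGet Bt i == m then pvFindI m Bt (i - 1) else i
termination_by (i + 1).toNat
decreasing_by omega

-- 'for B in combinations_with_replacement(range(m+1), k-1)' with the count/max_comps
-- break: combinations_with_replacement is a lazy ITERATIVE generator — CPython keeps an
-- indices array, first yields (0,)*r, and advances by 'scan for the rightmost index i with
-- indices[i] != m; indices[i:] = [indices[i]+1] * (r-i)' — transliterated here with the
-- consuming loop fused in; fuel only makes the recursion structural (the fuel passed below
-- is proved sufficient, so it never changes the computed value on Pre_)
def pvLoopA (w : List Int) (p mc m : Int) (r : Nat) :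
    Nat → Array Int → PySem.Set Int → Int → PySem.Set Int × Int
  | 0, _, im, count => (im, count)
  | fuel + 1, Bt, im, count =>
    let im' := PySem.Set.add im (pvFvalA w p Bt.toList)
    let count' := count + 1
    if mc ≤ count' then (im', count')
    else
      let i := pvFindI m Bt ((r : Int) - 1)
      if i < 0 then (im', count')
      else
        let v := pvAGet Bt i + 1
        pvLoopA w p mc m r fuel
          ((Bt.toList.take i.toNat ++ List.replicate (r - i.toNat) v).toArray) im' count'

def compute_image_by_layer (k : Int) (p : Int) (u : Int) (M : Int) (max_comps : Int) :
    (List (Int × List Int)) × (List (Int × List Int)) × Int :=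
  let weights := (PySem.List.pyRange 1 k 1).map (fun j => PySem.Int.powMod u j.toNat p)
  -- (k - 1).toNat = k - 1: Pre_ has 1 ≤ k (Python raises ValueError for k < 1)
  let fin := (PySem.List.pyRange 0 (M + 1) 1).foldl
    (fun (st : PySem.Dict Int (List Int) × PySem.Dict Int (List Int) × Int) m =>
      let layers := st.1
      let layer_new := st.2.1
      let res := pvLoopA weights p max_comps m (k - 1).toNat ((m.toNat + 1) ^ (k - 1).toNat + 1)
        (Array.replicate (k - 1).toNat 0) PySem.Set.empty 0
      let layers' := layers.insert m res.1
      let layer_new' :=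
        if m == 0 then layer_new.insert m res.1
        -- layers[m - 1]: the key is always present here (inserted in the previous iteration)
        else layer_new.insert m (PySem.Set.diff res.1 (layers'.getD (m - 1) []))
      (layers', layer_new', res.2))
    (PySem.Dict.empty, PySem.Dict.empty, (0 : Int))
  (fin.1.items, fin.2.1.items, fin.2.2)

-- ===== PORT B =====
-- for j in range(i, r): B[j] = v; prefix[j+1] = prefix[j] + weights[j] * pow2[v]
def pvUpd (weights pow2 : Array Int) (v i r : Int) (Bt pr : Array Int) :
    Array Int × Array Int :=
  (PySem.List.pyRange i r 1).foldl (fun bp j =>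
    (pvASet bp.1 j v,
     pvASet bp.2 (j + 1) (pvAGet bp.2 j + pvAGet weights j * pvAGet pow2 v)))
    (Bt, pr)

-- prefix = [0] * (r + 1); for j in range(r): prefix[j+1] = prefix[j] + weights[j] * pow2[0]
def pvInitPr (weights pow2 : Array Int) (r : Nat) : Array Int :=
  (PySem.List.pyRange 0 (r : Int) 1).foldl (fun pr j =>
    pvASet pr (j + 1) (pvAGet pr j + pvAGet weights j * pvAGet pow2 0))
    (Array.replicate (r + 1) 0)

-- the 'while True' odometer loop; fuel only makes the recursion structural (the fuel passed
-- below is proved sufficient, so it never changes the computed value on Pre_)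
def pvLoopB (weights pow2 : Array Int) (p max_comps m : Int) (r : Nat) :
    Nat → Array Int × Array Int → PySem.Set Int → Int → PySem.Set Int × Int
  | 0, _, im, count => (im, count)
  | fuel + 1, bp, im, count =>
    let im' := PySem.Set.add im (PySem.Int.mod (pvAGet bp.2 (r : Int)) p)
    let count' := count + 1
    if max_comps ≤ count' then (im', count')
    else
      let i := pvFindI m bp.1 ((r : Int) - 1)
      if i < 0 then (im', count')
      else
        let v := pvAGet bp.1 i + 1
        pvLoopB weights pow2 p max_comps m r fuel (pvUpd weights pow2 v i (r : Int) bp.1 bp.2) im' count'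

def compute_image_by_layer_alt (k : Int) (p : Int) (u : Int) (M : Int) (max_comps : Int) :
    (List (Int × List Int)) × (List (Int × List Int)) × Int :=
  let weights := ((PySem.List.pyRange 1 k 1).map (fun j => PySem.Int.powMod u j.toNat p)).toArray
  let r := (k - 1).toNat   -- r = k - 1: Pre_ has 1 ≤ k
  let pow2 := ((PySem.List.pyRange 0 (M + 1) 1).map (fun b => PySem.Int.powMod 2 b.toNat p)).toArray
  let fin := (PySem.List.pyRange 0 (M + 1) 1).foldl
    (fun (st : PySem.Dict Int (List Int) × PySem.Dict Int (List Int) × Int) m =>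
      let layers := st.1
      let layer_new := st.2.1
      let res := pvLoopB weights pow2 p max_comps m r ((m.toNat + 1) ^ r + 1)
        (Array.replicate r 0, pvInitPr weights pow2 r) PySem.Set.empty 0
      let layers' := layers.insert m res.1
      let layer_new' :=
        if m == 0 then layer_new.insert m res.1
        else layer_new.insert m (PySem.Set.diff res.1 (layers'.getD (m - 1) []))
      (layers', layer_new', res.2))
    (PySem.Dict.empty, PySem.Dict.empty, (0 : Int))
  (fin.1.items, fin.2.1.items, fin.2.2)

-- ===== PRECONDITION & SPEC =====
-- Pre_ = exactly where the Python A returns normally: k < 1 raises ValueError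
-- (negative tuple length), p = 0 raises ValueError (pow with zero modulus),
-- M < 0 raises UnboundLocalError ('count' never assigned).
def Pre_compute_image_by_layer (k : Int) (p : Int) (u : Int) (M : Int) (max_comps : Int) : Prop :=
  1 ≤ k ∧ p ≠ 0 ∧ 0 ≤ M
instance (k : Int) (p : Int) (u : Int) (M : Int) (max_comps : Int) : Decidable (Pre_compute_image_by_layer k p u M max_comps) := by unfold Pre_compute_image_by_layer; infer_instance

def pvWitness_compute_image_by_layer : Int × Int × Int × Int × Int := (3, 5, 2, 2, 500000)

def Spec_compute_image_by_layer (k : Int) (p : Int) (u : Int) (M : Int) (max_comps : Int) (out : (List (Int × List Int)) × (List (Int × List Int)) × Int) : Prop := out = compute_image_by_layer_alt k p u M max_comps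
instance (k : Int) (p : Int) (u : Int) (M : Int) (max_comps : Int) (out : (List (Int × List Int)) × (List (Int × List Int)) × Int) : Decidable (Spec_compute_image_by_layer k p u M max_comps out) := by unfold Spec_compute_image_by_layer; infer_instance

-- ===== CLAIM (what is proved, stated in full; the proofs are below) =====
def Claim_equal_compute_image_by_layer : Prop := ∀ (k : Int) (p : Int) (u : Int) (M : Int) (max_comps : Int), Dom_compute_image_by_layer k p u M max_comps → Pre_compute_image_by_layer k p u M max_comps → Spec_compute_image_by_layer k p u M max_comps (compute_image_by_layer k p u M max_comps)

-- ===== LEMMAS AND PROOFS =====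

-- itertools.combinations_with_replacement(range(hi), r), values from lo upward — the list of
-- non-decreasing r-tuples in lexicographic order, used to state what the A-side DFS visits
def pvCwr (lo hi : Int) (r : Nat) : List (List Int) :=
  match r with
  | 0 => [[]]
  | r' + 1 => (PySem.List.pyRange lo hi 1).flatMap (fun v => (pvCwr v hi r').map (fun t => v :: t))

-- the shared shape of both inner loops, on the already-computed value stream
def pvCapFold (max_comps : Int) : List Int → PySem.Set Int → Int → PySem.Set Int × Int
  | [], im, count => (im, count)
  | x :: xs, im, count =>
    let im' := PySem.Set.add im x
    let count' := count + 1
    if max_comps ≤ count' then (im', count')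
    else pvCapFold max_comps xs im' count'

-- list twins of the Array-state loop (same structure, Array ops replaced by their
-- List images); the ports are bridged to these and all reasoning happens on lists
def pvLGet (xs : List Int) (i : Int) : Int := xs.getD i.toNat 0
def pvLSet (xs : List Int) (i : Int) (v : Int) : List Int := xs.set i.toNat v

theorem pvLGet_natCast (xs : List Int) (n : Nat) : pvLGet xs (n : Int) = xs.getD n 0 := by
  simp [pvLGet]

theorem pvLSet_natCast (xs : List Int) (n : Nat) (v : Int) :
    pvLSet xs (n : Int) v = xs.set n v := by
  simp [pvLSet]

def pvFindIL (m : Int) (Bt : List Int) (i : Int) : Int :=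
  if h : 0 ≤ i ∧ pvLGet Bt i == m then pvFindIL m Bt (i - 1) else i
termination_by (i + 1).toNat
decreasing_by omega

def pvUpdL (weights pow2 : List Int) (v i r : Int) (Bt pr : List Int) :
    List Int × List Int :=
  (PySem.List.pyRange i r 1).foldl (fun bp j =>
    (pvLSet bp.1 j v,
     pvLSet bp.2 (j + 1) (pvLGet bp.2 j + pvLGet weights j * pvLGet pow2 v)))
    (Bt, pr)

def pvInitPrL (weights pow2 : List Int) (r : Nat) : List Int :=
  (PySem.List.pyRange 0 (r : Int) 1).foldl (fun pr j =>
    pvLSet pr (j + 1) (pvLGet pr j + pvLGet weights j * pvLGet pow2 0))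
    (List.replicate (r + 1) 0)

def pvLoopBL (weights pow2 : List Int) (p max_comps m : Int) (r : Nat) :
    Nat → List Int × List Int → PySem.Set Int → Int → PySem.Set Int × Int
  | 0, _, im, count => (im, count)
  | fuel + 1, bp, im, count =>
    let im' := PySem.Set.add im (PySem.Int.mod (pvLGet bp.2 (r : Int)) p)
    let count' := count + 1
    if max_comps ≤ count' then (im', count')
    else
      let i := pvFindIL m bp.1 ((r : Int) - 1)
      if i < 0 then (im', count')
      else
        let v := pvLGet bp.1 i + 1
        pvLoopBL weights pow2 p max_comps m r fuel (pvUpdL weights pow2 v i (r : Int) bp.1 bp.2) im' count'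

theorem pvAGet_toList (a : Array Int) (i : Int) : pvAGet a i = pvLGet a.toList i := by
  unfold pvAGet pvLGet
  rw [List.getD_eq_getElem?_getD, Array.getElem?_toList, Array.getD_eq_getD_getElem?]

theorem pvASet_toList (a : Array Int) (i : Int) (v : Int) :
    (pvASet a i v).toList = pvLSet a.toList i v := by
  unfold pvASet pvLSet
  rw [Array.toList_setIfInBounds]

theorem pvFindI_toList (m : Int) (a : Array Int) : ∀ (i : Int),
    pvFindI m a i = pvFindIL m a.toList i := by
  suffices H : ∀ (n : Nat) (i : Int), (i + 1).toNat = n →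
      pvFindI m a i = pvFindIL m a.toList i by
    exact fun i => H (i + 1).toNat i rfl
  intro n
  induction n using Nat.strong_induction_on with
  | _ n ih =>
    intro i hn
    rw [pvFindI, pvFindIL, pvAGet_toList]
    split
    · next h => exact ih i.toNat (by omega) (i - 1) (by omega)
    · rfl

theorem pvUpd_toList (w pw : Array Int) (v i r : Int) (Bt pr : Array Int) :
    ((pvUpd w pw v i r Bt pr).1.toList, (pvUpd w pw v i r Bt pr).2.toList) =
      pvUpdL w.toList pw.toList v i r Bt.toList pr.toList := by
  unfold pvUpd pvUpdL
  generalize PySem.List.pyRange i r 1 = l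
  induction l generalizing Bt pr with
  | nil => rfl
  | cons j js ih =>
    rw [List.foldl_cons, List.foldl_cons]
    have h1 := ih (pvASet Bt j v) (pvASet pr (j + 1) (pvAGet pr j + pvAGet w j * pvAGet pw v))
    rw [h1, pvASet_toList, pvASet_toList, pvAGet_toList, pvAGet_toList, pvAGet_toList]

theorem pvInitPr_toList (w pw : Array Int) (r : Nat) :
    (pvInitPr w pw r).toList = pvInitPrL w.toList pw.toList r := by
  unfold pvInitPr pvInitPrL
  have H : ∀ (l : List Int) (a : Array Int),
      (l.foldl (fun pr j => pvASet pr (j + 1) (pvAGet pr j + pvAGet w j * pvAGet pw 0)) a).toList =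
      l.foldl (fun pr j => pvLSet pr (j + 1) (pvLGet pr j + pvLGet w.toList j * pvLGet pw.toList 0)) a.toList := by
    intro l
    induction l with
    | nil => intro a; rfl
    | cons j js ih =>
      intro a
      rw [List.foldl_cons, List.foldl_cons, ih, pvASet_toList, pvAGet_toList,
        pvAGet_toList, pvAGet_toList]
  rw [H, Array.toList_replicate]

theorem pvLoopB_toList (w pw : Array Int) (p mc m : Int) (r : Nat) : ∀ (fuel : Nat)
    (bp : Array Int × Array Int) (im : PySem.Set Int) (c : Int),
    pvLoopB w pw p mc m r fuel bp im c =
      pvLoopBL w.toList pw.toList p mc m r fuel (bp.1.toList, bp.2.toList) im c := by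
  intro fuel
  induction fuel with
  | zero => intro bp im c; rfl
  | succ fuel ih =>
    intro bp im c
    rw [pvLoopB, pvLoopBL]
    simp only [pvAGet_toList, pvFindI_toList]
    split
    · rfl
    · split
      · rfl
      · rw [ih, pvUpd_toList]

def pvLoopAL (w : List Int) (p mc m : Int) (r : Nat) :
    Nat → List Int → PySem.Set Int → Int → PySem.Set Int × Int
  | 0, _, im, count => (im, count)
  | fuel + 1, Bt, im, count =>
    let im' := PySem.Set.add im (pvFvalA w p Bt)
    let count' := count + 1
    if mc ≤ count' then (im', count')
    else
      let i := pvFindIL m Bt ((r : Int) - 1)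
      if i < 0 then (im', count')
      else
        let v := pvLGet Bt i + 1
        pvLoopAL w p mc m r fuel (Bt.take i.toNat ++ List.replicate (r - i.toNat) v) im' count'

theorem pvLoopA_toList (w : List Int) (p mc m : Int) (r : Nat) : ∀ (fuel : Nat)
    (Bt : Array Int) (im : PySem.Set Int) (c : Int),
    pvLoopA w p mc m r fuel Bt im c = pvLoopAL w p mc m r fuel Bt.toList im c := by
  intro fuel
  induction fuel with
  | zero => intro Bt im c; rfl
  | succ fuel ih =>
    intro Bt im c
    rw [pvLoopA, pvLoopAL]
    simp only [pvAGet_toList, pvFindI_toList]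
    split
    · rfl
    · split
      · rfl
      · rw [ih, List.toList_toArray]

-- "all entries equal m" and the odometer successor relation
def pvAllM (m : Int) (a : List Int) : Prop := ∀ y ∈ a, y = m
def pvR (m : Int) (a b : List Int) : Prop :=
  ∃ pre x suf, a = pre ++ x :: suf ∧ x < m ∧ pvAllM m suf ∧
    b = pre ++ List.replicate (suf.length + 1) (x + 1)

inductive pvTr (m : Int) : List Int → List (List Int) → Prop
  | done (a : List Int) (h : pvAllM m a) : pvTr m a []
  | step (a b : List Int) (L : List (List Int)) (hR : pvR m a b) (ht : pvTr m b L) :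
      pvTr m a (b :: L)

theorem pvR_length {m : Int} {a b : List Int} (h : pvR m a b) : b.length = a.length := by
  obtain ⟨pre, x, suf, ha, _, _, hb⟩ := h
  subst ha hb; simp

theorem pvR_bounds {m : Int} {a b : List Int} (h : pvR m a b)
    (hb : ∀ y ∈ a, 0 ≤ y ∧ y ≤ m) : ∀ y ∈ b, 0 ≤ y ∧ y ≤ m := by
  obtain ⟨pre, x, suf, ha, hx, _, hbb⟩ := h
  subst ha hbb
  intro y hy
  rcases List.mem_append.1 hy with h1 | h2
  · exact hb y (List.mem_append.2 (Or.inl h1))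
  · have := List.eq_of_mem_replicate h2
    subst this
    have := hb x (by simp)
    omega

theorem pvTr_lift (m v : Int) : ∀ {a : List Int} {L : List (List Int)}, pvTr m a L → ∀ K,
    ((v = m ∧ K = []) ∨
      (v < m ∧ ∃ K', K = ((v + 1) :: List.replicate a.length (v + 1)) :: K' ∧
        pvTr m ((v + 1) :: List.replicate a.length (v + 1)) K')) →
    pvTr m (v :: a) (L.map (v :: ·) ++ K) := by
  intro a L h
  induction h with
  | done a ha =>
    intro K hK
    rcases hK with ⟨hv, hKnil⟩ | ⟨hv, K', hKeq, hK'⟩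
    · subst hKnil hv
      exact pvTr.done _ (by
        intro y hy
        rcases List.mem_cons.1 hy with rfl | hy'
        · rfl
        · exact ha y hy')
    · subst hKeq
      simp only [List.map_nil, List.nil_append]
      refine pvTr.step _ _ _ ?_ hK'
      refine ⟨[], v, a, by simp, hv, ha, ?_⟩
      simp [List.replicate_succ]
  | step a b L hR ht ih =>
    intro K hK
    have hlen : b.length = a.length := pvR_length hR
    simp only [List.map_cons, List.cons_append]
    refine pvTr.step _ _ _ ?_ (ih K (by rw [hlen]; exact hK))
    obtain ⟨pre, x, suf, ha, hx, hsuf, hbb⟩ := hR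
    exact ⟨v :: pre, x, suf, by simp [ha], hx, hsuf, by simp [hbb]⟩

-- block-by-block downward scan used in the trace characterisation of pvCwr
theorem pvBlocks_aux (m : Int) (r : Nat)
    (hcwr : ∀ lo : Int, 0 ≤ lo → lo ≤ m →
      ∃ L, pvCwr lo (m + 1) r = List.replicate r lo :: L ∧ pvTr m (List.replicate r lo) L) :
    ∀ (n : Nat) (v : Int), 0 ≤ v → v ≤ m → (m - v).toNat = n →
    ∃ K, (PySem.List.pyRange v (m + 1) 1).flatMap
        (fun w => (pvCwr w (m + 1) r).map (fun t => w :: t)) =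
      (v :: List.replicate r v) :: K ∧ pvTr m (v :: List.replicate r v) K := by
  intro n
  induction n with
  | zero =>
    intro v hv0 hvm hn
    have hvm' : v = m := by omega
    obtain ⟨Lv, hLv, hTr⟩ := hcwr v hv0 hvm
    have hrest : PySem.List.pyRange (v + 1) (m + 1) 1 = [] :=
      PySem.List.pyRange_one_eq_nil (by omega)
    rw [PySem.List.pyRange_one_cons (by omega : v < m + 1)]
    rw [List.flatMap_cons, hLv, hrest, List.flatMap_nil, List.append_nil, List.map_cons]
    refine ⟨(Lv.map (v :: ·)) ++ [], by simp, ?_⟩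
    exact pvTr_lift m v hTr [] (Or.inl ⟨hvm', rfl⟩)
  | succ n ih =>
    intro v hv0 hvm hn
    have hvlt : v < m := by omega
    obtain ⟨Lv, hLv, hTr⟩ := hcwr v hv0 hvm
    obtain ⟨K', hK'eq, hK'⟩ := ih (v + 1) (by omega) (by omega) (by omega)
    rw [PySem.List.pyRange_one_cons (by omega : v < m + 1)]
    rw [List.flatMap_cons, hLv, hK'eq, List.map_cons]
    refine ⟨(Lv.map (v :: ·)) ++ (((v + 1) :: List.replicate r (v + 1)) :: K'), by simp, ?_⟩
    refine pvTr_lift m v hTr _ (Or.inr ⟨hvlt, K', ?_, ?_⟩)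
    · rw [List.length_replicate]
    · rw [List.length_replicate]; exact hK'

theorem pvCwr_trace (m : Int) (hm : 0 ≤ m) : ∀ (r : Nat) (lo : Int), 0 ≤ lo → lo ≤ m →
    ∃ L, pvCwr lo (m + 1) r = List.replicate r lo :: L ∧ pvTr m (List.replicate r lo) L := by
  intro r
  induction r with
  | zero =>
    intro lo _ _
    exact ⟨[], rfl, pvTr.done [] (by intro y hy; cases hy)⟩
  | succ r ih =>
    intro lo hlo0 hlom
    obtain ⟨K, hK, hTr⟩ := pvBlocks_aux m r ih (m - lo).toNat lo hlo0 hlom rfl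
    exact ⟨K, by rw [pvCwr]; rw [hK]; rw [List.replicate_succ], by rw [List.replicate_succ]; exact hTr⟩

theorem pvCwr_length_le : ∀ (r : Nat) (lo hi : Int),
    (pvCwr lo hi r).length ≤ (hi - lo).toNat ^ r := by
  intro r
  induction r with
  | zero => intro lo hi; simp [pvCwr]
  | succ r ih =>
    intro lo hi
    rw [pvCwr, List.length_flatMap]
    calc ((PySem.List.pyRange lo hi 1).map
            (fun v => ((pvCwr v hi r).map (fun t => v :: t)).length)).sum
        ≤ ((PySem.List.pyRange lo hi 1).map
            (fun v => ((pvCwr v hi r).map (fun t => v :: t)).length)).length •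
            ((hi - lo).toNat ^ r) := by
          refine List.sum_le_card_nsmul _ _ ?_
          intro x hx
          obtain ⟨v, hv, rfl⟩ := List.mem_map.1 hx
          have hvlo : lo ≤ v := (PySem.List.mem_pyRange_one.1 hv).1
          rw [List.length_map]
          exact le_trans (ih v hi)
            (Nat.pow_le_pow_left (by omega : (hi - v).toNat ≤ (hi - lo).toNat) r)
      _ ≤ (hi - lo).toNat ^ (r + 1) := by
          rw [List.length_map, PySem.List.length_pyRange_one, smul_eq_mul, pow_succ]
          exact Nat.mul_le_mul_left _ (le_refl _) |>.trans (by rw [Nat.mul_comm])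

-- partial sums: pvS w pw B j = prefix[j] for the tuple B
def pvS (w pw : List Int) (B : List Int) (j : Nat) : Int :=
  ((List.range j).map (fun t => w.getD t 0 * pvLGet pw (B.getD t 0))).sum

def pvPS (w pw : List Int) (B : List Int) : List Int :=
  (List.range (B.length + 1)).map (pvS w pw B)

theorem pvS_congr {w pw : List Int} {B B' : List Int} {j : Nat}
    (h : ∀ t : Nat, t < j → B.getD t 0 = B'.getD t 0) : pvS w pw B j = pvS w pw B' j := by
  unfold pvS
  congr 1
  exact List.map_congr_left (fun t ht => by rw [h t (List.mem_range.1 ht)])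

theorem pvS_succ (w pw : List Int) (B : List Int) (j : Nat) :
    pvS w pw B (j + 1) = pvS w pw B j + w.getD j 0 * pvLGet pw (B.getD j 0) := by
  unfold pvS
  rw [List.range_succ]
  simp


theorem pvPS_length (w pw B : List Int) : (pvPS w pw B).length = B.length + 1 := by
  simp [pvPS]

theorem pvPS_getD (w pw B : List Int) (j : Nat) (hj : j ≤ B.length) :
    (pvPS w pw B).getD j 0 = pvS w pw B j := by
  have h : j < ((List.range (B.length + 1)).map (pvS w pw B)).length := by simp; omega
  rw [pvPS, List.getD_eq_getElem _ 0 h, List.getElem_map]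
  simp

theorem pvPS_getElem (w pw B : List Int) (j : Nat) (hj : j < (pvPS w pw B).length) :
    (pvPS w pw B)[j] = pvS w pw B j := by
  simp only [pvPS] at hj ⊢
  rw [List.getElem_map]
  simp

theorem pvSetMid {α : Type} (X Y : List α) (j : Nat) (hj : j < X.length)
    (hXY : j < Y.length) :
    (X.take j ++ Y.drop j).set j X[j] = X.take (j + 1) ++ Y.drop (j + 1) := by
  have hl : (X.take j).length = j := by rw [List.length_take]; omega
  rw [List.set_append_right _ _ (by omega), hl, Nat.sub_self]
  rw [List.drop_eq_getElem_cons hXY, List.set_cons_zero]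
  rw [List.take_succ_eq_append_getElem hj, List.append_assoc, List.singleton_append]

theorem pvGetMid {α : Type} (X Y : List α) (d : α) (j n : Nat) (hj : j < n)
    (hjX : j < X.length) :
    (X.take n ++ Y).getD j d = X.getD j d := by
  rw [List.getD_append _ _ _ _ (by rw [List.length_take]; omega)]
  simp [List.getD_eq_getElem?_getD, List.getElem?_take_of_lt hj]

-- the init loop builds exactly the prefix sums of the all-zero tuple
theorem pvInitPr_eq (w pw : List Int) (r : Nat) :
    pvInitPrL w pw r = pvPS w pw (List.replicate r 0) := by
  have H : ∀ (n j : Nat), j ≤ r → r - j = n →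
      (PySem.List.pyRange (j : Int) (r : Int) 1).foldl (fun pr j =>
        pvLSet pr (j + 1) (pvLGet pr j + pvLGet w j * pvLGet pw 0))
        ((pvPS w pw (List.replicate r 0)).take (j + 1) ++ List.replicate (r - j) 0)
      = pvPS w pw (List.replicate r 0) := by
    intro n
    induction n with
    | zero =>
      intro j hj hn
      have hjr : j = r := by omega
      subst hjr
      rw [PySem.List.pyRange_one_eq_nil (le_refl _), List.foldl_nil, Nat.sub_self,
        List.replicate_zero, List.append_nil]
      exact List.take_of_length_le (by rw [pvPS_length]; simp)
    | succ n ih =>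
      intro j hj hn
      have hjr : j < r := by omega
      rw [PySem.List.pyRange_one_cons (by exact_mod_cast hjr), List.foldl_cons]
      have hcast : (j : Int) + 1 = ((j + 1 : Nat) : Int) := by push_cast; ring
      have hstep :
          pvLSet
            ((pvPS w pw (List.replicate r 0)).take (j + 1) ++ List.replicate (r - j) 0)
            ((j : Int) + 1)
            (pvLGet
              ((pvPS w pw (List.replicate r 0)).take (j + 1) ++ List.replicate (r - j) 0)
              (j : Int) +
              pvLGet w (j : Int) * pvLGet pw 0)
          = (pvPS w pw (List.replicate r 0)).take (j + 1 + 1) ++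
              List.replicate (r - (j + 1)) 0 := by
        rw [hcast, pvLSet_natCast, pvLGet_natCast, pvLGet_natCast]
        have hget : ((pvPS w pw (List.replicate r 0)).take (j + 1) ++
            List.replicate (r - j) 0).getD j 0 = pvS w pw (List.replicate r 0) j := by
          rw [pvGetMid _ _ _ j (j + 1) (by omega) (by rw [pvPS_length]; simp; omega)]
          exact pvPS_getD _ _ _ j (by simp; omega)
        rw [hget]
        have hval : pvS w pw (List.replicate r 0) j + w.getD j 0 * pvLGet pw 0
            = (pvPS w pw (List.replicate r 0))[j + 1]'(by rw [pvPS_length]; simp; omega) := by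
          rw [pvPS_getElem _ _ _ (j + 1) (by rw [pvPS_length]; simp; omega), pvS_succ]
          rw [List.getD_replicate _ hjr]
        have hrep : List.replicate (r - j) (0 : Int)
            = (List.replicate (r + 1) (0 : Int)).drop (j + 1) := by
          rw [List.drop_replicate]
          congr 1
          omega
        rw [hval, hrep,
          pvSetMid _ _ (j + 1) (by rw [pvPS_length]; simp; omega) (by simp; omega),
          List.drop_replicate]
        congr 2
        omega
      rw [hstep, hcast]
      exact ih (j + 1) (by omega) (by omega)
  have hinit : List.replicate (r + 1) (0 : Int)
      = (pvPS w pw (List.replicate r 0)).take (0 + 1) ++ List.replicate (r - 0) 0 := by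
    have h1 : (pvPS w pw (List.replicate r 0)).take 1 = [0] := by
      simp [pvPS, List.range_succ_eq_map, pvS]
    rw [h1, Nat.sub_zero, List.replicate_succ, List.singleton_append]
  rw [pvInitPrL, hinit]
  exact H r 0 (by omega) (by omega)

-- the update loop from the found index rebuilds exactly the prefix sums of the successor
theorem pvUpd_eq (w pw : List Int) (m : Int) {pre suf B' : List Int} (x : Int)
    (hB' : B' = pre ++ List.replicate (suf.length + 1) (x + 1)) :
    pvUpdL w pw (x + 1) (pre.length : Int) ((pre ++ x :: suf).length : Int)
        (pre ++ x :: suf) (pvPS w pw (pre ++ x :: suf)) =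
      (B', pvPS w pw B') := by
  set Bt := pre ++ x :: suf with hBt
  set i := pre.length with hi
  set r := Bt.length with hrr
  have hir : i ≤ r := by
    rw [hrr, hBt]; simp only [List.length_append, List.length_cons]; omega
  have hlenB' : B'.length = r := by
    rw [hB', hrr, hBt]; simp only [List.length_append, List.length_cons, List.length_replicate]; try omega
  have hpre : ∀ t : Nat, t < i → B'.getD t 0 = Bt.getD t 0 := by
    intro t ht
    subst hB'
    rw [List.getD_append _ _ _ _ (by omega), List.getD_append _ _ _ _ (by omega)]
  have hBj : ∀ t : Nat, i ≤ t → t < r → B'.getD t 0 = x + 1 := by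
    intro t ht1 ht2
    subst hB'
    rw [List.getD_eq_getElem _ 0 (by omega)]
    rw [List.getElem_append_right (by omega)]
    simp
  have htake : (pvPS w pw B').take (i + 1) = (pvPS w pw Bt).take (i + 1) := by
    apply List.ext_getElem
    · rw [List.length_take, List.length_take, pvPS_length, pvPS_length, hlenB']
    · intro t h1 h2
      rw [List.getElem_take, List.getElem_take]
      have ht : t ≤ i := by
        rw [List.length_take, pvPS_length] at h1
        omega
      rw [pvPS_getElem _ _ _ t (by rw [pvPS_length]; omega),
        pvPS_getElem _ _ _ t (by rw [pvPS_length]; omega)]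
      exact pvS_congr (fun t' ht' => hpre t' (by omega))
  have H : ∀ (n j : Nat), i ≤ j → j ≤ r → r - j = n →
      (PySem.List.pyRange (j : Int) (r : Int) 1).foldl (fun bp j =>
        (pvLSet bp.1 j (x + 1),
         pvLSet bp.2 (j + 1) (pvLGet bp.2 j + pvLGet w j * pvLGet pw (x + 1))))
        (B'.take j ++ Bt.drop j, (pvPS w pw B').take (j + 1) ++ (pvPS w pw Bt).drop (j + 1))
      = (B', pvPS w pw B') := by
    intro n
    induction n with
    | zero =>
      intro j hij hjr hn
      have hjr' : j = r := by omega
      subst hjr'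
      rw [PySem.List.pyRange_one_eq_nil (le_refl _), List.foldl_nil]
      rw [List.take_of_length_le (by omega), List.drop_eq_nil_of_le (by omega),
        List.take_of_length_le (by rw [pvPS_length]; try omega),
        List.drop_eq_nil_of_le (by rw [pvPS_length]; try omega),
        List.append_nil, List.append_nil]
    | succ n ih =>
      intro j hij hjr hn
      have hjr' : j < r := by omega
      rw [PySem.List.pyRange_one_cons (by exact_mod_cast hjr'), List.foldl_cons]
      have hcast : (j : Int) + 1 = ((j + 1 : Nat) : Int) := by push_cast; ring
      have hBcomp :
          pvLSet (B'.take j ++ Bt.drop j) (j : Int) (x + 1)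
            = B'.take (j + 1) ++ Bt.drop (j + 1) := by
        rw [pvLSet_natCast]
        have hx1 : x + 1 = B'[j]'(by omega) := by
          rw [← List.getD_eq_getElem _ 0 (by omega)]
          exact (hBj j hij hjr').symm
        rw [hx1]
        exact pvSetMid _ _ j (by omega) (by omega)
      have hPcomp :
          pvLSet
            ((pvPS w pw B').take (j + 1) ++ (pvPS w pw Bt).drop (j + 1))
            ((j : Int) + 1)
            (pvLGet
              ((pvPS w pw B').take (j + 1) ++ (pvPS w pw Bt).drop (j + 1)) (j : Int) +
              pvLGet w (j : Int) * pvLGet pw (x + 1))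
            = (pvPS w pw B').take (j + 1 + 1) ++ (pvPS w pw Bt).drop (j + 1 + 1) := by
        rw [hcast, pvLSet_natCast, pvLGet_natCast, pvLGet_natCast]
        have hget : ((pvPS w pw B').take (j + 1) ++ (pvPS w pw Bt).drop (j + 1)).getD j 0
            = pvS w pw B' j := by
          rw [pvGetMid _ _ _ j (j + 1) (by omega) (by rw [pvPS_length]; omega)]
          exact pvPS_getD _ _ _ j (by omega)
        rw [hget]
        have hval : pvS w pw B' j + w.getD j 0 * pvLGet pw (x + 1)
            = (pvPS w pw B')[j + 1]'(by rw [pvPS_length]; omega) := by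
          rw [pvPS_getElem _ _ _ (j + 1) (by rw [pvPS_length]; omega), pvS_succ]
          rw [hBj j hij hjr']
        rw [hval]
        exact pvSetMid _ _ (j + 1) (by rw [pvPS_length]; omega)
          (by rw [pvPS_length]; omega)
      rw [hBcomp, hPcomp, hcast]
      exact ih (j + 1) (by omega) (by omega) (by omega)
  have hinit1 : Bt = B'.take i ++ Bt.drop i := by
    have h1 : B'.take i = pre := by
      subst hB'
      exact List.take_left
    have h2 : Bt.drop i = x :: suf := by
      rw [hBt, hi]
      exact List.drop_left
    rw [h1, h2]
  have hinit2 : pvPS w pw Bt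
      = (pvPS w pw B').take (i + 1) ++ (pvPS w pw Bt).drop (i + 1) := by
    rw [htake, List.take_append_drop]
  rw [pvUpdL]
  nth_rewrite 1 [hinit1]
  nth_rewrite 1 [hinit2]
  exact H (r - i) i (le_refl _) hir rfl

-- an indexed sum over two equal-length lists is the sum over their zip
theorem pvIndexedZip (f : Int → Int → Int) : ∀ (r : Nat) (w B : List Int),
    w.length = r → B.length = r →
    ((List.range r).map (fun t => f (w.getD t 0) (B.getD t 0))).sum =
      ((w.zip B).map (fun wb => f wb.1 wb.2)).sum := by
  intro r
  induction r with
  | zero =>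
    intro w B hw hB
    rw [List.eq_nil_of_length_eq_zero hw, List.eq_nil_of_length_eq_zero hB]
    rfl
  | succ r ih =>
    intro w B hw hB
    match w, B with
    | a :: w', b :: B' =>
      rw [List.range_succ_eq_map, List.map_cons, List.map_map, List.zip_cons_cons,
        List.map_cons, List.sum_cons, List.sum_cons]
      congr 1
      · exact ih w' B' (by simpa using hw) (by simpa using hB)

-- reading prefix[r] and reducing mod p is exactly A's f_val
theorem pvFval_eq (w pw : List Int) (p M m : Int) (B : List Int) (r : Nat)
    (hw : w.length = r) (hlen : B.length = r)
    (hpw : pw = (PySem.List.pyRange 0 (M + 1) 1).map (fun b => PySem.Int.powMod 2 b.toNat p))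
    (hbnd : ∀ y ∈ B, 0 ≤ y ∧ y ≤ m) (hmM : m ≤ M) :
    PySem.Int.mod (pvLGet (pvPS w pw B) (r : Int)) p = pvFvalA w p B := by
  rw [pvLGet_natCast, pvPS_getD _ _ _ r (by rw [hlen])]
  unfold pvFvalA
  rw [← pvIndexedZip (fun a b => a * PySem.Int.powMod 2 b.toNat p) r w B hw hlen]
  unfold pvS
  congr 2
  apply List.map_congr_left
  intro t ht
  have htr : t < r := List.mem_range.1 ht
  have hBmem : B.getD t 0 ∈ B := by
    rw [List.getD_eq_getElem _ 0 (by omega)]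
    exact List.getElem_mem _
  obtain ⟨hy0, hym⟩ := hbnd _ hBmem
  have hcast : pvLGet pw (B.getD t 0) = PySem.List.pyGetD pw (B.getD t 0) 0 := by
    rw [pvLGet, show B.getD t 0 = (((B.getD t 0).toNat : Nat) : Int) by omega,
      PySem.List.pyGetD_natCast]
    rw [Int.toNat_natCast]
  rw [hcast, hpw, PySem.List.pyGetD_map_pyRange_of_nonneg _ _ _ _ hy0 (by omega)]

theorem pvFindI_neg (m : Int) (Bt : List Int) :
    ∀ i : Int, i < (Bt.length : Int) →
    (∀ j : Nat, (j : Int) ≤ i → Bt.getD j 0 = m) → pvFindIL m Bt i < 0 := by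
  suffices H : ∀ (n : Nat) (i : Int), (i + 1).toNat = n → i < (Bt.length : Int) →
      (∀ j : Nat, (j : Int) ≤ i → Bt.getD j 0 = m) → pvFindIL m Bt i < 0 by
    exact fun i => H (i + 1).toNat i rfl
  intro n
  induction n using Nat.strong_induction_on with
  | _ n ih =>
    intro i hn hlen hall
    rw [pvFindIL]
    split
    · next h =>
      obtain ⟨h0, hEq⟩ := h
      exact ih i.toNat (by omega) (i - 1) (by omega) (by omega)
        (fun j hj => hall j (by omega))
    · next h =>
      rcases lt_or_ge i 0 with h' | h'
      · exact h'
      · exfalso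
        apply h
        refine ⟨h', ?_⟩
        rw [pvLGet, hall i.toNat (by omega)]
        exact beq_self_eq_true m

theorem pvFindI_found (m : Int) (pre suf : List Int) (x : Int) (hx : x ≠ m)
    (hsuf : pvAllM m suf) :
    ∀ i : Int, (pre.length : Int) ≤ i → i < ((pre ++ x :: suf).length : Int) →
    pvFindIL m (pre ++ x :: suf) i = (pre.length : Int) := by
  suffices H : ∀ (n : Nat) (i : Int), (i - pre.length).toNat = n → (pre.length : Int) ≤ i →
      i < ((pre ++ x :: suf).length : Int) →
      pvFindIL m (pre ++ x :: suf) i = (pre.length : Int) by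
    exact fun i h1 h2 => H (i - pre.length).toNat i rfl h1 h2
  intro n
  induction n using Nat.strong_induction_on with
  | _ n ih =>
    intro i hn hlo hhi
    have hlen : ((pre ++ x :: suf).length : Int) = (pre.length : Int) + suf.length + 1 := by
      simp; omega
    have hgetElem : ∀ t : Nat, pre.length < t → t < (pre ++ x :: suf).length →
        (pre ++ x :: suf).getD t 0 = m := by
      intro t ht1 ht2
      rw [List.getD_eq_getElem _ 0 ht2, List.getElem_append_right (by omega)]
      obtain ⟨a, ha⟩ : ∃ a, t - pre.length = a + 1 := ⟨t - pre.length - 1, by omega⟩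
      simp only [ha, List.getElem_cons_succ]
      exact hsuf _ (List.getElem_mem _)
    rw [pvFindIL]
    split
    · next h =>
      obtain ⟨h0, hEq⟩ := h
      have hne : (pre.length : Int) ≠ i := by
        intro hEqi
        have hval : pvLGet (pre ++ x :: suf) i = x := by
          rw [← hEqi, pvLGet_natCast,
            List.getD_eq_getElem _ 0 (by simp),
            List.getElem_append_right (le_refl _)]
          simp
        rw [hval] at hEq
        exact hx (by simpa using hEq)
      exact ih (i - 1 - pre.length).toNat (by omega) (i - 1) rfl (by omega) (by omega)
    · next h =>
      rcases eq_or_lt_of_le hlo with h' | h'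
      · exact h'.symm
      · exfalso
        apply h
        refine ⟨by omega, ?_⟩
        rw [pvLGet, hgetElem i.toNat (by omega) (by omega)]
        exact beq_self_eq_true m

-- the simulation: the odometer loop consumes exactly the trace of the cwr list
theorem pvSim (w pw : List Int) (p mc M m : Int) (r : Nat)
    (hw : w.length = r)
    (hpw : pw = (PySem.List.pyRange 0 (M + 1) 1).map (fun b => PySem.Int.powMod 2 b.toNat p))
    (hmM : m ≤ M) :
    ∀ (L : List (List Int)) (Bt : List Int) (im : PySem.Set Int) (c : Int) (fuel : Nat),
    pvTr m Bt L → (∀ y ∈ Bt, 0 ≤ y ∧ y ≤ m) → Bt.length = r → L.length < fuel →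
    pvLoopBL w pw p mc m r fuel (Bt, pvPS w pw Bt) im c =
      pvCapFold mc ((Bt :: L).map (pvFvalA w p)) im c := by
  intro L Bt im c fuel h
  induction h generalizing im c fuel with
  | done a ha =>
    intro hbnd hlen hfuel
    match fuel, hfuel with
    | f + 1, _ =>
      rw [pvLoopBL]
      simp only [List.map_cons, List.map_nil, pvCapFold]
      rw [pvFval_eq w pw p M m a r hw hlen hpw hbnd hmM]
      split
      · rfl
      · have hneg : pvFindIL m a ((r : Int) - 1) < 0 := by
          apply pvFindI_neg m a ((r : Int) - 1) (by omega)
          intro j hj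
          rw [List.getD_eq_getElem _ 0 (by omega)]
          exact ha _ (List.getElem_mem _)
        rw [if_pos hneg]
  | step a b L hR ht ih =>
    intro hbnd hlen hfuel
    match fuel, hfuel with
    | f + 1, hf =>
      have hblen : b.length = r := by rw [pvR_length hR, hlen]
      have hbbnd : ∀ y ∈ b, 0 ≤ y ∧ y ≤ m := pvR_bounds hR hbnd
      obtain ⟨pre, x, suf, hax, hx, hsuf, hbx⟩ := hR
      rw [pvLoopBL]
      simp only [List.map_cons, pvCapFold]
      rw [pvFval_eq w pw p M m a r hw hlen hpw hbnd hmM]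
      split
      · rfl
      · have hprelt : (pre.length : Int) < (r : Int) := by
          rw [← hlen, hax]; simp only [List.length_append, List.length_cons]; push_cast; omega
        have halen : ((pre ++ x :: suf).length : Int) = (r : Int) := by
          rw [← hax, hlen]
        have hfound : pvFindIL m a ((r : Int) - 1) = (pre.length : Int) := by
          rw [hax]
          apply pvFindI_found m pre suf x (by omega) hsuf
          · omega
          · omega
        rw [hfound]
        rw [if_neg (by omega)]
        have hv : pvLGet a (pre.length : Int) + 1 = x + 1 := by
          rw [hax, pvLGet_natCast,
            List.getD_eq_getElem _ 0 (by simp),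
            List.getElem_append_right (le_refl _)]
          simp
        rw [hv]
        have hupd : pvUpdL w pw (x + 1) (pre.length : Int) (r : Int) a (pvPS w pw a)
            = (b, pvPS w pw b) := by
          rw [hax, show ((r : Nat) : Int) = ((pre ++ x :: suf).length : Int) by
            rw [← hax, hlen]]
          exact pvUpd_eq w pw m x hbx
        rw [hupd]
        exact ih _ _ f hbbnd hblen (by simp only [List.length_cons] at hf; omega)

-- the same simulation for A's fused generator loop (f recomputed from the whole tuple)
theorem pvSimA (w : List Int) (p mc m : Int) (r : Nat) :
    ∀ (L : List (List Int)) (Bt : List Int) (im : PySem.Set Int) (c : Int) (fuel : Nat),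
    pvTr m Bt L → (∀ y ∈ Bt, 0 ≤ y ∧ y ≤ m) → Bt.length = r → L.length < fuel →
    pvLoopAL w p mc m r fuel Bt im c =
      pvCapFold mc ((Bt :: L).map (pvFvalA w p)) im c := by
  intro L Bt im c fuel h
  induction h generalizing im c fuel with
  | done a ha =>
    intro hbnd hlen hfuel
    match fuel, hfuel with
    | f + 1, _ =>
      rw [pvLoopAL]
      simp only [List.map_cons, List.map_nil, pvCapFold]
      split
      · rfl
      · have hneg : pvFindIL m a ((r : Int) - 1) < 0 := by
          apply pvFindI_neg m a ((r : Int) - 1) (by omega)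
          intro j hj
          rw [List.getD_eq_getElem _ 0 (by omega)]
          exact ha _ (List.getElem_mem _)
        rw [if_pos hneg]
  | step a b L hR ht ih =>
    intro hbnd hlen hfuel
    match fuel, hfuel with
    | f + 1, hf =>
      have hblen : b.length = r := by rw [pvR_length hR, hlen]
      have hbbnd : ∀ y ∈ b, 0 ≤ y ∧ y ≤ m := pvR_bounds hR hbnd
      obtain ⟨pre, x, suf, hax, hx, hsuf, hbx⟩ := hR
      rw [pvLoopAL]
      simp only [List.map_cons, pvCapFold]
      split
      · rfl
      · have hprelt : (pre.length : Int) < (r : Int) := by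
          rw [← hlen, hax]; simp only [List.length_append, List.length_cons]; push_cast; omega
        have halen : ((pre ++ x :: suf).length : Int) = (r : Int) := by
          rw [← hax, hlen]
        have hfound : pvFindIL m a ((r : Int) - 1) = (pre.length : Int) := by
          rw [hax]
          apply pvFindI_found m pre suf x (by omega) hsuf
          · omega
          · omega
        rw [hfound]
        rw [if_neg (by omega)]
        have hv : pvLGet a (pre.length : Int) + 1 = x + 1 := by
          rw [hax, pvLGet_natCast,
            List.getD_eq_getElem _ 0 (by simp),
            List.getElem_append_right (le_refl _)]
          simp
        rw [hv]
        have hupd : a.take ((pre.length : Int)).toNat ++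
            List.replicate (r - ((pre.length : Int)).toNat) (x + 1) = b := by
          rw [Int.toNat_natCast, hax, hbx]
          have h1 : (pre ++ x :: suf).take pre.length = pre := List.take_left
          rw [h1]
          have h2 : r - pre.length = suf.length + 1 := by
            rw [← hlen, hax]; simp only [List.length_append, List.length_cons]; omega
          rw [h2]
        rw [hupd]
        exact ih _ _ f hbbnd hblen (by simp only [List.length_cons] at hf; omega)

-- per-layer equality of the two inner computations
theorem pvInner_eq (w pw : List Int) (p mc M m : Int) (r : Nat)
    (hw : w.length = r)
    (hpw : pw = (PySem.List.pyRange 0 (M + 1) 1).map (fun b => PySem.Int.powMod 2 b.toNat p))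
    (hm : 0 ≤ m) (hmM : m ≤ M) :
    pvLoopBL w pw p mc m r ((m.toNat + 1) ^ r + 1)
        (List.replicate r 0, pvInitPrL w pw r) PySem.Set.empty 0 =
      pvLoopAL w p mc m r ((m.toNat + 1) ^ r + 1) (List.replicate r 0) PySem.Set.empty 0 := by
  obtain ⟨L, hcwr, hTr⟩ := pvCwr_trace m hm r 0 (le_refl 0) hm
  have hfuel : L.length < (m.toNat + 1) ^ r + 1 := by
    have h1 := pvCwr_length_le r 0 (m + 1)
    rw [hcwr] at h1
    have h2 : (m + 1 - 0).toNat = m.toNat + 1 := by omega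
    rw [h2] at h1
    simp only [List.length_cons] at h1
    omega
  have hbnd : ∀ y ∈ List.replicate r (0 : Int), 0 ≤ y ∧ y ≤ m :=
    fun y hy => by rw [List.eq_of_mem_replicate hy]; omega
  rw [pvInitPr_eq]
  rw [pvSim w pw p mc M m r hw hpw hmM L (List.replicate r 0) PySem.Set.empty 0
    ((m.toNat + 1) ^ r + 1) hTr hbnd (List.length_replicate) hfuel]
  rw [pvSimA w p mc m r L (List.replicate r 0) PySem.Set.empty 0
    ((m.toNat + 1) ^ r + 1) hTr hbnd (List.length_replicate) hfuel]

-- ===== VERDICT (by name: the statement is the Claim_ definition above) =====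
theorem compute_image_by_layer_spec : Claim_equal_compute_image_by_layer := by
  unfold Claim_equal_compute_image_by_layer
  intro k p u M max_comps hdom hpre
  obtain ⟨hk, hp, hM⟩ := hpre
  unfold Spec_compute_image_by_layer
  simp only [compute_image_by_layer, compute_image_by_layer_alt]
  refine congrArg
    (fun st : PySem.Dict Int (List Int) × PySem.Dict Int (List Int) × Int =>
      (st.1.items, st.2.1.items, st.2.2)) ?_
  refine PySem.List.foldl_congr_mem _ _ _ _ ?_
  intro acc x hx
  obtain ⟨hx0, hxM⟩ := PySem.List.mem_pyRange_one.1 hx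
  have hinner := pvInner_eq
    ((PySem.List.pyRange 1 k 1).map (fun j => PySem.Int.powMod u j.toNat p))
    ((PySem.List.pyRange 0 (M + 1) 1).map (fun b => PySem.Int.powMod 2 b.toNat p))
    p max_comps M x ((k - 1).toNat)
    (by rw [List.length_map, PySem.List.length_pyRange_one])
    rfl hx0 (by omega)
  rw [pvLoopA_toList, pvLoopB_toList, pvInitPr_toList]
  simp only [Array.toList_replicate]
  rw [hinner]
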